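-- pv_equiv track=rewrite | github.com/sergey-igoshin/algm_dz7 | task_7_2_2.py | free_sorted
-- ===== SOURCE A (Python) =====
-- def free_sorted(data):
--     for i in range(len(data)):
--         a = b = c = 0
--         for j in range(len(data)):
--             if data[i] < data[j]:
--                 a += 1
--             elif data[i] > data[j]:
--                 c += 1
--             else:
--                 b += 1
--         b -= 1
--         if a == c or a == b + c or c == a + b or (b > 1 and abs(c - a) < b):
--             return data[i]
-- ===== SOURCE B (Python) =====
-- def free_sorted(data):
--     n = len(data)
--     cnt = {}
--     for x in data:
--         cnt[x] = cnt.get(x, 0) + 1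
--     for x in data:
--         b = cnt[x] - 1
--         c = sum(v for k, v in cnt.items() if k < x)
--         a = n - c - cnt[x]
--         if a == c or a == b + c or c == a + b or (b > 1 and abs(c - a) < b):
--             return x
-- ===== Notes on version B (the rewrite author's own statement) =====
-- stated objective: alternative
-- what changed: A compares every element against every other element in nested loops; B builds a value->multiplicity dict in one pass and derives each element's (a, b, c) rank counts from the dict (b from its multiplicity, c by summing multiplicities of smaller keys, a by complement n - c - cnt[x]).
import Mathlib
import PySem

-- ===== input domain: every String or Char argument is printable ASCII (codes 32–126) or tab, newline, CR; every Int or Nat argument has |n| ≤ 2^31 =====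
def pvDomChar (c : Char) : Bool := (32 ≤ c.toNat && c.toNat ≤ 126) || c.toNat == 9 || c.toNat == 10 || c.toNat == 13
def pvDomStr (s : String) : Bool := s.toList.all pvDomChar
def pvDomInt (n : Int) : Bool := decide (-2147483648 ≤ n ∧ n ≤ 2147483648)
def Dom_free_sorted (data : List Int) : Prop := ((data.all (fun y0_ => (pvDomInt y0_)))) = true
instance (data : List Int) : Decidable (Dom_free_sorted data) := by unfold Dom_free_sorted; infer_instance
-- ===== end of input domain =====

-- B replaces A's quadratic all-pairs comparison loops by one counting dict built once,
-- from which each element's (a, b, c) rank counts are computed; objective: alternative.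

-- ===== PORT A =====
-- inner-loop body of A: one comparison step updating the (a, b, c) counters
def fsInnerStep (di : Int) (t : Int × Int × Int) (dj : Int) : Int × Int × Int :=
  if di < dj then (t.1 + 1, t.2.1, t.2.2)
  else if di > dj then (t.1, t.2.1, t.2.2 + 1)
  else (t.1, t.2.1 + 1, t.2.2)

-- outer-loop body of A: count a, b, c over all j, then test and possibly return data[i]
def fsStepA (data : List Int) (acc : Option Int) (di : Int) : Option Int :=
  match acc with
  | some r => some r
  | none =>
    let t := (PySem.List.pyRange 0 data.length 1).foldl
      (fun t j => fsInnerStep di t (PySem.List.pyGetD data j 0)) (0, 0, 0)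
    let a := t.1
    let b := t.2.1 - 1
    let c := t.2.2
    if a = c ∨ a = b + c ∨ c = a + b ∨ (b > 1 ∧ |c - a| < b) then some di else none

-- literal port of A: for each index i, the inner loop over all j counts
-- a = #{j | data[i] < data[j]}, c = #{j | data[i] > data[j]}, b = #{j | equal}; first hit returns.
def free_sorted (data : List Int) : Option Int :=
  (PySem.List.pyRange 0 data.length 1).foldl
    (fun acc i => fsStepA data acc (PySem.List.pyGetD data i 0)) none

-- ===== PORT B =====
-- loop body of Source B: read b from cnt, c as the sum of multiplicities of smaller keys,
-- a = n - c - cnt[x], then the same test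
def fsStepB (cnt : PySem.Dict Int Int) (n : Int) (acc : Option Int) (x : Int) : Option Int :=
  match acc with
  | some r => some r
  | none =>
    let b := cnt.getD x 0 - 1
    let c := ((cnt.items.filter (fun kv => kv.1 < x)).map (fun kv => kv.2)).sum
    let a := n - c - cnt.getD x 0
    if a = c ∨ a = b + c ∨ c = a + b ∨ (b > 1 ∧ |c - a| < b) then some x else none

-- literal port of Source B: build cnt = {value: multiplicity} once, then scan data in order.
def free_sorted_alt (data : List Int) : Option Int :=
  let cnt := data.foldl (fun d x => d.insert x (d.getD x 0 + 1)) PySem.Dict.empty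
  let n : Int := data.length
  data.foldl (fsStepB cnt n) none

-- ===== PRECONDITION & SPEC =====
def Spec_free_sorted (data : List Int) (out : Option Int) : Prop := out = free_sorted_alt data
instance (data : List Int) (out : Option Int) : Decidable (Spec_free_sorted data out) := by unfold Spec_free_sorted; infer_instance

-- ===== CLAIM (what is proved, stated in full; the proofs are below) =====
def Claim_equal_free_sorted : Prop := ∀ (data : List Int), Dom_free_sorted data → Spec_free_sorted data (free_sorted data)

-- ===== LEMMAS AND PROOFS =====

-- Counting trichotomy: the three inner-loop counters of A partition the list.
theorem fs_tri (x : Int) (d : List Int) :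
    d.countP (fun y => decide (x < y)) + d.count x + d.countP (fun y => decide (y < x)) = d.length := by
  induction d with
  | nil => simp
  | cons y t ih =>
    rcases lt_trichotomy x y with h | h | h
    · simp [h, h.ne', not_lt.mpr h.le]; omega
    · subst h; simp; omega
    · simp [h, h.ne, not_lt.mpr h.le]; omega

-- A's inner loop computes exactly (countP (x < ·), count x, countP (· < x)), shifted by the seed.
theorem fs_inner (x : Int) (d : List Int) (t : Int × Int × Int) :
    d.foldl (fsInnerStep x) t
      = (t.1 + (d.countP (fun y => decide (x < y)) : Int),
         t.2.1 + (d.count x : Int),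
         t.2.2 + (d.countP (fun y => decide (y < x)) : Int)) := by
  induction d generalizing t with
  | nil => simp
  | cons y s ih =>
    rcases lt_trichotomy x y with h | h | h
    · simp only [List.foldl_cons, fsInnerStep, if_pos h, ih, List.countP_cons, List.count_cons]
      simp [h, h.ne', not_lt.mpr h.le]; omega
    · subst h
      simp only [List.foldl_cons, fsInnerStep, if_neg (lt_irrefl x), ih, List.countP_cons,
        List.count_cons]
      simp; omega
    · simp only [List.foldl_cons, fsInnerStep, if_neg (not_lt.mpr h.le), if_pos h, ih,
        List.countP_cons, List.count_cons]
      simp [h, h.ne, not_lt.mpr h.le]; omega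

-- Summing the multiplicities of the distinct keys below x gives countP (· < x).
theorem fs_sum (xs : List Int) (x : Int) :
    ((((PySem.Set.ofList xs).filter (fun k => decide (k < x))).map
        (fun k => ((List.count k xs : Nat) : Int))).sum)
      = ((xs.countP (fun y => decide (y < x)) : Nat) : Int) := by
  have hnd2 : ((PySem.Set.ofList xs).filter (fun k => decide (k < x))).Nodup :=
    (PySem.Set.nodup_ofList xs).filter _
  rw [← List.sum_toFinset _ hnd2]
  have hfs : (((PySem.Set.ofList xs).filter (fun k => decide (k < x))).toFinset)
      = xs.toFinset.filter (fun k => k < x) := by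
    ext k; simp [List.mem_toFinset, PySem.Set.mem_ofList]
  rw [hfs]
  have h2 : xs.countP (fun y => decide (y < x)) = (xs.filter (fun y => decide (y < x))).length := by
    simp [List.countP_eq_length_filter]
  rw [h2, ← List.sum_toFinset_count_eq_length (xs.filter (fun y => decide (y < x))),
    List.toFinset_filter]
  push_cast
  refine Finset.sum_congr (by ext k; simp) ?_
  intro k hk
  simp only [Finset.mem_filter] at hk
  rw [List.count_filter]
  simp [hk.2]

-- The two loop bodies agree once the counts are identified.
theorem fs_step_eq (data : List Int) (acc : Option Int) (x : Int) :
    fsStepA data acc x = fsStepB (PySem.Dict.counter data) (data.length : Int) acc x := by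
  cases acc with
  | some r => rfl
  | none =>
    unfold fsStepA fsStepB
    rw [PySem.List.foldl_pyRange_zero_pyGetD' data 0 (fsInnerStep x) (0, 0, 0)]
    rw [fs_inner x data (0, 0, 0)]
    simp only [PySem.Dict.getD_counter, PySem.Dict.items_counter, List.filter_map,
      List.map_map, Function.comp_def]
    rw [fs_sum data x]
    have htri := fs_tri x data
    have ha : (data.length : Int) - ((data.countP (fun y => decide (y < x)) : Nat) : Int)
        - (data.count x : Int) = (data.countP (fun y => decide (x < y)) : Int) := by
      omega
    simp only [zero_add]
    rw [ha]

-- ===== VERDICT (by name: the statement is the Claim_ definition above) =====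
theorem free_sorted_spec : Claim_equal_free_sorted := by
  intro data _
  unfold Spec_free_sorted
  have h1 : free_sorted data = data.foldl (fsStepA data) none :=
    PySem.List.foldl_pyRange_zero_pyGetD' data 0 (fsStepA data) none
  have h2 : free_sorted_alt data
      = data.foldl (fsStepB (PySem.Dict.counter data) (data.length : Int)) none := by
    unfold free_sorted_alt
    rw [PySem.Dict.foldl_insert_getD_add_one_eq_counter data]
  rw [h1, h2]
  exact PySem.List.foldl_congr_mem data _ _ none
    (fun acc x _ => fs_step_eq data acc x)
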